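-- pv_equiv track=rewrite | github.com/MdAbedin/binarysearch | 0401 - 0500/0452 Number of Unique Character Substrings.py | solve
-- ===== SOURCE A (Python) =====
-- def solve(s):
--     c = 0
--     last_char = ""
--     ans = 0
--
--     for i in range(len(s)):
--         if last_char == s[i]:
--             c += 1
--         else:
--             c = 1
--             last_char = s[i]
--         ans += c
--
--     return ans
-- ===== SOURCE B (Python) =====
-- def solve(s):
--     ans = 0
--     i = 0
--     n = len(s)
--     while i < n:
--         j = i
--         while j < n and s[j] == s[i]:
--             j += 1
--         L = j - i
--         ans += L * (L + 1) // 2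
--         i = j
--     return ans
-- ===== Notes on version B (the rewrite author's own statement) =====
-- stated objective: alternative
-- what changed: B decomposes the string into maximal runs of equal characters and adds the closed form L*(L+1)//2 per run, instead of A's per-character running counter.
import Mathlib
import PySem

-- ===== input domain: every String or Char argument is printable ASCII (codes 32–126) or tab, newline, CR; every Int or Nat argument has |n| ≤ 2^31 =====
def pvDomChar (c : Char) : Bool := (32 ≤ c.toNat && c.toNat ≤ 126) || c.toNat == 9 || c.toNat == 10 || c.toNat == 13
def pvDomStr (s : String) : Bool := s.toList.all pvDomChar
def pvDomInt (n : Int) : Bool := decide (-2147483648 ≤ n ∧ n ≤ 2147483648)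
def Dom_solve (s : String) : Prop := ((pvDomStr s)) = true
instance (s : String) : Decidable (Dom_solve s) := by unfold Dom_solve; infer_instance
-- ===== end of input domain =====

-- B replaces A's per-character running counter with a run-length decomposition
-- and the closed form L*(L+1)//2 per maximal run (alternative algorithm, same cost).

-- ===== PORT A =====
-- state (c, last_char, ans); Python's s[i] is a one-character string, kept as String here
def solveStep (st : Int × String × Int) (ch : Char) : Int × String × Int :=
  let c := st.1; let last := st.2.1; let ans := st.2.2
  if last == String.ofList [ch] then (c + 1, last, ans + (c + 1))
  else (1, String.ofList [ch], ans + 1)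

def solve (s : String) : Int :=
  (s.toList.foldl solveStep (0, "", 0)).2.2

-- ===== PORT B =====
-- one maximal run per step: run length L, contribution L*(L+1)//2
def solveBGo : List Char → Int
  | [] => 0
  | x :: xs =>
    let run := xs.takeWhile (fun y => y == x)
    let rest := xs.dropWhile (fun y => y == x)
    let L : Int := (run.length : Int) + 1
    PySem.Int.floordiv (L * (L + 1)) 2 + solveBGo rest
termination_by l => l.length
decreasing_by
  exact Nat.lt_succ_of_le (List.length_dropWhile_le _ _)

def solve_alt (s : String) : Int := solveBGo s.toList

-- ===== PRECONDITION & SPEC =====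
def Spec_solve (s : String) (out : Int) : Prop := out = solve_alt s
instance (s : String) (out : Int) : Decidable (Spec_solve s out) := by unfold Spec_solve; infer_instance

-- ===== CLAIM (what is proved, stated in full; the proofs are below) =====
def Claim_equal_solve : Prop := ∀ (s : String), Dom_solve s → Spec_solve s (solve s)

-- ===== LEMMAS AND PROOFS =====

-- A's remaining contribution when the previous character is x with current count c
def ansFrom : List Char → Int → Char → Int
  | [], _, _ => 0
  | y :: ys, c, x => if y = x then (c + 1) + ansFrom ys (c + 1) y else 1 + ansFrom ys 1 y

-- A's contribution starting fresh (no previous character)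
def ansStart : List Char → Int
  | [] => 0
  | y :: ys => 1 + ansFrom ys 1 y

-- sum_{i=1..k} (c+i), in A's accumulation order
def S (c : Int) : Nat → Int
  | 0 => 0
  | k + 1 => (c + 1) + S (c + 1) k

theorem step_pos (c ans : Int) (x : Char) :
    solveStep (c, String.ofList [x], ans) x = (c + 1, String.ofList [x], ans + (c + 1)) := by
  simp [solveStep]

theorem step_neg (c ans : Int) (x y : Char) (h : y ≠ x) :
    solveStep (c, String.ofList [x], ans) y = (1, String.ofList [y], ans + 1) := by
  have hb : (String.ofList [x] == String.ofList [y]) = false := by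
    simp [String.ofList_inj]; exact fun hxy => h hxy.symm
  simp [solveStep, hb]

theorem step_init (ans : Int) (c : Int) (y : Char) :
    solveStep (c, "", ans) y = (1, String.ofList [y], ans + 1) := by
  have hb : (("" : String) == String.ofList [y]) = false := by
    rw [show ("" : String) = String.ofList [] from rfl]
    simp
  simp [solveStep, hb]

theorem foldl_eq_ansFrom (l : List Char) : ∀ (c ans : Int) (x : Char),
    (l.foldl solveStep (c, String.ofList [x], ans)).2.2 = ans + ansFrom l c x := by
  induction l with
  | nil => intro c ans x; simp [ansFrom]
  | cons y ys ih =>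
    intro c ans x
    rw [List.foldl_cons]
    by_cases h : y = x
    · subst h
      rw [step_pos, ih,
        show ansFrom (y :: ys) c y = (c + 1) + ansFrom ys (c + 1) y from by simp [ansFrom]]
      ring
    · rw [step_neg _ _ _ _ h, ih]
      simp only [ansFrom, if_neg h]
      ring

theorem solve_eq_ansStart (s : String) : solve s = ansStart s.toList := by
  unfold solve
  cases hl : s.toList with
  | nil => rfl
  | cons y ys =>
    rw [List.foldl_cons, step_init, foldl_eq_ansFrom]
    simp only [ansStart]
    ring

theorem ansFrom_run (l : List Char) : ∀ (c : Int) (x : Char),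
    ansFrom l c x = S c (l.takeWhile (fun y => y == x)).length
      + ansStart (l.dropWhile (fun y => y == x)) := by
  induction l with
  | nil => intro c x; simp [ansFrom, ansStart, S]
  | cons y ys ih =>
    intro c x
    by_cases h : y = x
    · subst h
      rw [show ansFrom (y :: ys) c y = (c + 1) + ansFrom ys (c + 1) y from by
        simp [ansFrom]]
      rw [ih]
      simp only [List.takeWhile, List.dropWhile, BEq.rfl, List.length_cons, S]
      ring
    · have hb : (y == x) = false := by simp [h]
      rw [show ansFrom (y :: ys) c x = 1 + ansFrom ys 1 y from by simp [ansFrom, h]]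
      simp only [List.takeWhile, List.dropWhile, hb, List.length_nil, S, ansStart]
      ring

theorem two_S (k : Nat) : ∀ c : Int, 2 * S c k = 2 * k * c + k * (k + 1) := by
  induction k with
  | zero => intro c; simp [S]
  | succ n ih =>
    intro c
    rw [show S c (n + 1) = (c + 1) + S (c + 1) n from rfl]
    push_cast
    linear_combination ih (c + 1)

theorem tri_eq (k : Nat) :
    PySem.Int.floordiv (((k : Int) + 1) * (((k : Int) + 1) + 1)) 2 = 1 + S 1 k := by
  have h := two_S k 1
  have h2 : ((k : Int) + 1) * (((k : Int) + 1) + 1) = (1 + S 1 k) * 2 := by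
    linear_combination -h
  rw [h2, PySem.Int.floordiv_eq_ediv_of_pos (by norm_num)]
  exact Int.mul_ediv_cancel _ (by norm_num)

theorem solveBGo_nil : solveBGo [] = 0 := by
  rw [solveBGo]

theorem solveBGo_cons (x : Char) (xs : List Char) :
    solveBGo (x :: xs) =
      PySem.Int.floordiv ((((xs.takeWhile (fun y => y == x)).length : Int) + 1)
        * ((((xs.takeWhile (fun y => y == x)).length : Int) + 1) + 1)) 2
      + solveBGo (xs.dropWhile (fun y => y == x)) := by
  rw [solveBGo]

theorem ansStart_eq_solveBGo : ∀ (n : Nat) (l : List Char), l.length ≤ n →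
    ansStart l = solveBGo l := by
  intro n
  induction n with
  | zero =>
    intro l hl
    have : l = [] := List.eq_nil_of_length_eq_zero (Nat.le_zero.mp hl)
    subst this
    rw [solveBGo_nil]; rfl
  | succ m ih =>
    intro l hl
    cases l with
    | nil => rw [solveBGo_nil]; rfl
    | cons x xs =>
      rw [solveBGo_cons, tri_eq,
        ← ih _ (le_trans (List.length_dropWhile_le _ _) (Nat.le_of_succ_le_succ hl)),
        show ansStart (x :: xs) = 1 + ansFrom xs 1 x from rfl, ansFrom_run]
      ring

-- ===== VERDICT (by name: the statement is the Claim_ definition above) =====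
theorem solve_spec : Claim_equal_solve := by
  intro s _
  unfold Spec_solve solve_alt
  rw [solve_eq_ansStart]
  exact ansStart_eq_solveBGo s.toList.length s.toList le_rfl
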